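-- pv_equiv track=rewrite | github.com/Jerrypiglet/indoorInverse | train/utils/utils_misc.py | only1true
-- ===== SOURCE A (Python) =====
-- def only1true(l):
--     true_found = False
--     for v in l:
--         if v:
--             # a True was found!
--             if true_found:
--                 # found too many True's
--                 return False
--             else:
--                 # found the first True
--                 true_found = True
--     # found zero or one True value
--     return true_found
-- ===== SOURCE B (Python) =====
-- def only1true(l):
--     return sum(map(bool, l)) == 1
-- ===== Notes on version B (the rewrite author's own statement) =====
-- stated objective: idiomatic
-- what changed: Replaces A's short-circuiting flag loop with a full-list count: sum the truthiness of all elements and compare the total to 1.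
import Mathlib
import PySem

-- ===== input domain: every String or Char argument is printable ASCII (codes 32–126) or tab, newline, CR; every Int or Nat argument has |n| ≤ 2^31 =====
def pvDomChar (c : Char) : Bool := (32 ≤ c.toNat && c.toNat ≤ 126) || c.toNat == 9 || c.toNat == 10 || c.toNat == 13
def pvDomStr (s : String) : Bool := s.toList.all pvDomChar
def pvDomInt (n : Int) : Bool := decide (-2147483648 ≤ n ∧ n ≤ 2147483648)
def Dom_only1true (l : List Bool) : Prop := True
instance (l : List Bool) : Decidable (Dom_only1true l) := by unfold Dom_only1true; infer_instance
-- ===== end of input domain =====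

-- B replaces A's early-exit flag loop by counting all truthy elements and comparing the total to 1 (idiomatic).

-- ===== PORT A =====
-- loop over l with the true_found flag; early return False on a second True
def only1true_go (tf : Bool) : List Bool → Bool
  | [] => tf
  | v :: vs => if v then (if tf then false else only1true_go true vs) else only1true_go tf vs

def only1true (l : List Bool) : Bool := only1true_go false l

-- ===== PORT B =====
-- sum(map(bool, l)) == 1 : bools count as 1/0, sum the whole list, compare to 1
def only1true_alt (l : List Bool) : Bool :=
  decide ((l.map (fun v => if v then (1 : Int) else 0)).sum = 1)

-- ===== PRECONDITION & SPEC =====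
def Spec_only1true (l : List Bool) (out : Bool) : Prop := out = only1true_alt l
instance (l : List Bool) (out : Bool) : Decidable (Spec_only1true l out) := by unfold Spec_only1true; infer_instance

-- ===== CLAIM (what is proved, stated in full; the proofs are below) =====
def Claim_equal_only1true : Prop := ∀ (l : List Bool), Dom_only1true l → Spec_only1true l (only1true l)

-- ===== LEMMAS AND PROOFS =====
-- A's loop computes: flag clear ⇒ "sum = 1"; flag set ⇒ "sum = 0"
theorem only1true_go_sum (l : List Bool) :
    only1true_go false l = decide ((l.map (fun v => if v then (1 : Int) else 0)).sum = 1) ∧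
    only1true_go true l = decide ((l.map (fun v => if v then (1 : Int) else 0)).sum = 0) := by
  induction l with
  | nil => simp [only1true_go]
  | cons v vs ih =>
    obtain ⟨ih0, ih1⟩ := ih
    have hnn : 0 ≤ (vs.map (fun v => if v then (1 : Int) else 0)).sum := by
      apply List.sum_nonneg; intro x hx
      simp only [List.mem_map] at hx
      obtain ⟨b, _, rfl⟩ := hx
      split <;> norm_num
    cases v <;> simp [only1true_go, ih0, ih1] <;> omega

-- ===== VERDICT (by name: the statement is the Claim_ definition above) =====
theorem only1true_spec : Claim_equal_only1true := by
  intro l _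
  exact (only1true_go_sum l).1
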